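-- pv_equiv track=rewrite | github.com/yukhldkv/hexlet-solutions | module_2/1_dictionaries_and_sets/exercises/7.py | diff_keys
-- ===== SOURCE A (Python) =====
-- def diff_keys(old: dict, new: dict) -> dict:
--     oldset = set()
--     newset = set()
--     for element in old:
--         oldset.add(element)
--     for element in new:
--         newset.add(element)
--     result = {"kept": set(), "added": set(), "removed": set()}
--     result["kept"] = oldset & newset
--     result["added"] = newset - oldset
--     result["removed"] = oldset - newset
--     return result
-- ===== SOURCE B (Python) =====
-- def diff_keys(old: dict, new: dict) -> dict:
--     result = {"kept": set(), "added": set(), "removed": set()}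
--     for key in old:
--         if key in new:
--             result["kept"].add(key)
--         else:
--             result["removed"].add(key)
--     for key in new:
--         if key not in old:
--             result["added"].add(key)
--     return result
-- ===== Notes on version B (the rewrite author's own statement) =====
-- stated objective: simpler
-- what changed: Replaces building two key sets and combining them with set algebra (&, -) by classifying each key directly: one pass over old branching each key into kept/removed by membership in new, one pass over new adding keys absent from old.
import Mathlib
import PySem

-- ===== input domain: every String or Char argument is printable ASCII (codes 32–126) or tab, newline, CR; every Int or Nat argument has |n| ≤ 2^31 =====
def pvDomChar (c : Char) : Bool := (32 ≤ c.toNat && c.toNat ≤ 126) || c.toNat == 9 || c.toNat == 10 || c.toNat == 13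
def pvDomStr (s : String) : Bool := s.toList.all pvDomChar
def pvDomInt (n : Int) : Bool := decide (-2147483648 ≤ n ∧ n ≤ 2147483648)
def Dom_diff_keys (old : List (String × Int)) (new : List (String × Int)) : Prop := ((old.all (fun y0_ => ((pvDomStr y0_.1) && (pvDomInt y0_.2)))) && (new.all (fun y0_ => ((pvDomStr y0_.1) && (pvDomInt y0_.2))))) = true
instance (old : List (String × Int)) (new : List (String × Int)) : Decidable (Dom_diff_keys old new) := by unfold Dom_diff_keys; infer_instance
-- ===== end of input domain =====

-- B replaces A's two prebuilt key sets and set algebra (&, -) by classifying each key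
-- directly via membership tests in two per-key branching passes (objective: simpler).

-- ===== PORT A =====
def diff_keys (old : List (String × Int)) (new : List (String × Int)) : List (String × List String) :=
  let oldset : PySem.Set String := old.foldl (fun s kv => PySem.Set.add s kv.1) PySem.Set.empty
  let newset : PySem.Set String := new.foldl (fun s kv => PySem.Set.add s kv.1) PySem.Set.empty
  let result : PySem.Dict String (List String) :=
    PySem.Dict.ofList [("kept", PySem.Set.empty), ("added", PySem.Set.empty), ("removed", PySem.Set.empty)]
  let result := result.insert "kept" (PySem.Set.inter oldset newset)
  let result := result.insert "added" (PySem.Set.diff newset oldset)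
  let result := result.insert "removed" (PySem.Set.diff oldset newset)
  result.items

-- ===== PORT B =====
def diff_keys_alt (old : List (String × Int)) (new : List (String × Int)) : List (String × List String) :=
  let result : PySem.Dict String (List String) :=
    PySem.Dict.ofList [("kept", PySem.Set.empty), ("added", PySem.Set.empty), ("removed", PySem.Set.empty)]
  let result := old.foldl (fun r kv =>
    if new.any (fun kv2 => kv2.1 == kv.1) then
      r.modify "kept" [] (fun s => PySem.Set.add s kv.1)
    else
      r.modify "removed" [] (fun s => PySem.Set.add s kv.1)) result
  let result := new.foldl (fun r kv =>
    if old.any (fun kv2 => kv2.1 == kv.1) then r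
    else r.modify "added" [] (fun s => PySem.Set.add s kv.1)) result
  result.items

-- ===== PRECONDITION & SPEC =====
def Spec_diff_keys (old : List (String × Int)) (new : List (String × Int)) (out : List (String × List String)) : Prop := out = diff_keys_alt old new
instance (old : List (String × Int)) (new : List (String × Int)) (out : List (String × List String)) : Decidable (Spec_diff_keys old new out) := by unfold Spec_diff_keys; infer_instance

-- ===== CLAIM (what is proved, stated in full; the proofs are below) =====
def Claim_equal_diff_keys : Prop := ∀ (old : List (String × Int)) (new : List (String × Int)), Dom_diff_keys old new → Spec_diff_keys old new (diff_keys old new)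

-- ===== LEMMAS AND PROOFS =====

theorem pv_fold1 (l : List (String × Int)) (p : String × Int → Bool) (k0 a0 r0 : List String) :
    l.foldl (fun r kv =>
      if p kv then r.modify "kept" [] (fun s => PySem.Set.add s kv.1)
      else r.modify "removed" [] (fun s => PySem.Set.add s kv.1))
      (PySem.Dict.mk [("kept", k0), ("added", a0), ("removed", r0)])
    = PySem.Dict.mk [("kept", l.foldl (fun s kv => if p kv then PySem.Set.add s kv.1 else s) k0),
        ("added", a0),
        ("removed", l.foldl (fun s kv => if p kv then s else PySem.Set.add s kv.1) r0)] := by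
  induction l generalizing k0 r0 with
  | nil => rfl
  | cons kv t ih =>
    by_cases h : p kv = true
    · simp only [List.foldl_cons, h, if_true]
      rw [show (PySem.Dict.mk [("kept", k0), ("added", a0), ("removed", r0)]).modify "kept" []
            (fun s => PySem.Set.add s kv.1)
          = PySem.Dict.mk [("kept", PySem.Set.add k0 kv.1), ("added", a0), ("removed", r0)] from rfl]
      exact ih _ _
    · simp only [List.foldl_cons, h]
      rw [show (PySem.Dict.mk [("kept", k0), ("added", a0), ("removed", r0)]).modify "removed" []
            (fun s => PySem.Set.add s kv.1)
          = PySem.Dict.mk [("kept", k0), ("added", a0), ("removed", PySem.Set.add r0 kv.1)] from rfl]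
      exact ih _ _

theorem pv_fold2 (l : List (String × Int)) (q : String × Int → Bool) (k0 a0 r0 : List String) :
    l.foldl (fun r kv =>
      if q kv then r
      else r.modify "added" [] (fun s => PySem.Set.add s kv.1))
      (PySem.Dict.mk [("kept", k0), ("added", a0), ("removed", r0)])
    = PySem.Dict.mk [("kept", k0),
        ("added", l.foldl (fun s kv => if q kv then s else PySem.Set.add s kv.1) a0),
        ("removed", r0)] := by
  induction l generalizing a0 with
  | nil => rfl
  | cons kv t ih =>
    by_cases h : q kv = true
    · simp only [List.foldl_cons, h, if_true]; exact ih _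
    · simp only [List.foldl_cons, h]
      rw [show (PySem.Dict.mk [("kept", k0), ("added", a0), ("removed", r0)]).modify "added" []
            (fun s => PySem.Set.add s kv.1)
          = PySem.Dict.mk [("kept", k0), ("added", PySem.Set.add a0 kv.1), ("removed", r0)] from rfl]
      exact ih _

theorem pv_condfold {α : Type} [BEq α] (l : List α) (p : α → Bool) (s0 : PySem.Set α) :
    l.foldl (fun s x => if p x then PySem.Set.add s x else s) s0
    = (l.filter p).foldl PySem.Set.add s0 := by
  induction l generalizing s0 with
  | nil => rfl
  | cons x t ih =>
    by_cases h : p x = true <;> simp [h, ih]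

theorem pv_condfold2 {α : Type} [BEq α] (l : List α) (p : α → Bool) (s0 : PySem.Set α) :
    l.foldl (fun s x => if p x then s else PySem.Set.add s x) s0
    = (l.filter (fun x => !p x)).foldl PySem.Set.add s0 := by
  induction l generalizing s0 with
  | nil => rfl
  | cons x t ih =>
    by_cases h : p x = true <;> simp [h, ih]

theorem pv_filter_ofList {α : Type} [BEq α] [LawfulBEq α] (p : α → Bool) (xs : List α) :
    (PySem.Set.ofList xs).filter p = PySem.Set.ofList (xs.filter p) := by
  induction xs with
  | nil => rfl
  | cons x t ih =>
    rw [PySem.Set.ofList_cons]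
    by_cases h : p x = true
    · simp only [List.filter_cons, h, if_true, PySem.Set.ofList_cons]
      congr 1
      rw [PySem.Set.discard, List.filter_filter, PySem.Set.discard, ← ih, List.filter_filter]
      exact List.filter_congr (fun a _ => by rw [Bool.and_comm])
    · simp only [List.filter_cons, h, Bool.false_eq_true, if_false]
      rw [PySem.Set.discard, List.filter_filter, ← ih]
      apply List.filter_congr
      intro a _
      by_cases hp : p a = true
      · have hax : a ≠ x := fun e => h (e ▸ hp)
        simp [hp, hax]
      · simp [hp]

theorem pv_keyset (l : List (String × Int)) :
    l.foldl (fun s kv => PySem.Set.add s kv.1) PySem.Set.empty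
    = PySem.Set.ofList (l.map Prod.fst) := by
  rw [PySem.Set.ofList_eq_foldl, ← List.foldl_map]
  rfl

theorem pv_memb (new : List (String × Int)) (x : String) :
    (new.any fun kv2 => kv2.1 == x) = (PySem.Set.ofList (new.map Prod.fst)).contains x := by
  rw [Bool.eq_iff_iff]
  simp only [List.any_eq_true, beq_iff_eq, PySem.Set.contains_iff, PySem.Set.mem_ofList,
    List.mem_map]

theorem pv_kept (old new : List (String × Int)) :
    PySem.Set.inter (PySem.Set.ofList (old.map Prod.fst)) (PySem.Set.ofList (new.map Prod.fst))
    = old.foldl (fun s kv => if new.any (fun kv2 => kv2.1 == kv.1) then PySem.Set.add s kv.1 else s) [] := by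
  simp only [pv_memb]
  rw [← List.foldl_map (f := Prod.fst)
      (g := fun s x => if (PySem.Set.ofList (new.map Prod.fst)).contains x then PySem.Set.add s x else s),
    pv_condfold, ← PySem.Set.ofList_eq_foldl, PySem.Set.inter, pv_filter_ofList]

theorem pv_removed (old new : List (String × Int)) :
    PySem.Set.diff (PySem.Set.ofList (old.map Prod.fst)) (PySem.Set.ofList (new.map Prod.fst))
    = old.foldl (fun s kv => if new.any (fun kv2 => kv2.1 == kv.1) then s else PySem.Set.add s kv.1) [] := by
  simp only [pv_memb]
  rw [← List.foldl_map (f := Prod.fst)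
      (g := fun s x => if (PySem.Set.ofList (new.map Prod.fst)).contains x then s else PySem.Set.add s x),
    pv_condfold2, ← PySem.Set.ofList_eq_foldl, PySem.Set.diff, pv_filter_ofList]

theorem pv_A_items (K Ad R : List String) :
    ((((PySem.Dict.ofList [("kept", (PySem.Set.empty : List String)), ("added", PySem.Set.empty), ("removed", PySem.Set.empty)]).insert "kept" K).insert "added" Ad).insert "removed" R).items
    = [("kept", K), ("added", Ad), ("removed", R)] := by
  rfl

-- ===== VERDICT (by name: the statement is the Claim_ definition above) =====
theorem diff_keys_spec : Claim_equal_diff_keys := by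
  intro old new _
  unfold Spec_diff_keys diff_keys diff_keys_alt
  simp only [pv_keyset]
  rw [pv_A_items]
  rw [show (PySem.Dict.ofList [("kept", (PySem.Set.empty : List String)), ("added", PySem.Set.empty), ("removed", PySem.Set.empty)])
      = PySem.Dict.mk [("kept", []), ("added", []), ("removed", [])] from rfl]
  rw [pv_fold1, pv_fold2]
  rw [pv_kept, pv_removed, pv_removed]
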